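-- pv_equiv track=rewrite | github.com/Eui9179/algorithm-study | programmers/python/level1/p42862.py | solution
-- ===== SOURCE A (Python) =====
-- def solution(n:int, lost:list, reserve:list):
--     _lost = sorted([l for l in lost if l not in reserve])
--     _reserve = sorted([r for r in reserve if r not in lost])
--
--     answer = n - len(_lost)
--
--     for l in _lost:
--         for r in _reserve:
--             if abs(l - r) <= 1:
--                 _reserve.remove(r)
--                 answer += 1
--                 break
--
--     return answer
-- ===== SOURCE B (Python) =====
-- def solution(n: int, lost: list, reserve: list):
--     lost_set = set(lost)
--     reserve_set = set(reserve)
--     cnt = {}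
--     for r in reserve:
--         if r not in lost_set:
--             cnt[r] = cnt.get(r, 0) + 1
--     _lost = sorted(l for l in lost if l not in reserve_set)
--     answer = n - len(_lost)
--     for l in _lost:
--         if cnt.get(l - 1, 0) > 0:
--             cnt[l - 1] -= 1
--             answer += 1
--         elif cnt.get(l, 0) > 0:
--             cnt[l] -= 1
--             answer += 1
--         elif cnt.get(l + 1, 0) > 0:
--             cnt[l + 1] -= 1
--             answer += 1
--     return answer
-- ===== Notes on version B (the rewrite author's own statement) =====
-- stated objective: faster
-- what changed: Replaces A's nested scan of the live reserve list (with list.remove) by a multiplicity dictionary built in one pass, so each sorted lost student needs only three O(1) lookups (l-1, l, l+1) instead of a linear scan.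
import Mathlib
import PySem

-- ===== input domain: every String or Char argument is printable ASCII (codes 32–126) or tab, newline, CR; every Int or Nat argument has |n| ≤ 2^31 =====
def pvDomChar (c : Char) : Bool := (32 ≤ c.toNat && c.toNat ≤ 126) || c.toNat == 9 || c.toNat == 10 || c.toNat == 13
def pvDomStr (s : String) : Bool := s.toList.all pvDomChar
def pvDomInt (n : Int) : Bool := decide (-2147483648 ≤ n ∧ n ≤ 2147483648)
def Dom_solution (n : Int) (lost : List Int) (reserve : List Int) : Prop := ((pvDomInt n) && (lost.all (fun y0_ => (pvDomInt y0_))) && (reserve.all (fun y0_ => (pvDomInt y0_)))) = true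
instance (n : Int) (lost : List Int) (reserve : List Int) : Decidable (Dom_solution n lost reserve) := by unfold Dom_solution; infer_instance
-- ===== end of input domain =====

-- B replaces A's nested scan-and-remove over the reserve list by a count dictionary
-- with three O(1) candidate lookups (l-1, l, l+1) per lost student (objective: faster).

-- ===== PORT A =====
def solution (n : Int) (lost : List Int) (reserve : List Int) : Int :=
  let _lost := PySem.List.sorted (lost.filter (fun l => !reserve.contains l)) (fun x => x) false
  let _reserve := PySem.List.sorted (reserve.filter (fun r => !lost.contains r)) (fun x => x) false
  let st := _lost.foldl (fun (st : List Int × Int) l =>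
      match st.1.find? (fun r => decide (|l - r| ≤ 1)) with
      | some r => ((PySem.List.remove? st.1 r).getD st.1, st.2 + 1)
      | none => st) (_reserve, n - _lost.length)
  st.2

-- ===== PORT B =====
def solution_alt (n : Int) (lost : List Int) (reserve : List Int) : Int :=
  let lost_set := PySem.Set.ofList lost
  let reserve_set := PySem.Set.ofList reserve
  let cnt := reserve.foldl (fun (d : PySem.Dict Int Int) r =>
      if lost_set.contains r then d else d.insert r (d.getD r 0 + 1)) PySem.Dict.empty
  let _lost := PySem.List.sorted (lost.filter (fun l => !reserve_set.contains l)) (fun x => x) false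
  let st := _lost.foldl (fun (st : PySem.Dict Int Int × Int) l =>
      if st.1.getD (l - 1) 0 > 0 then (st.1.insert (l - 1) (st.1.getD (l - 1) 0 - 1), st.2 + 1)
      else if st.1.getD l 0 > 0 then (st.1.insert l (st.1.getD l 0 - 1), st.2 + 1)
      else if st.1.getD (l + 1) 0 > 0 then (st.1.insert (l + 1) (st.1.getD (l + 1) 0 - 1), st.2 + 1)
      else st) (cnt, n - _lost.length)
  st.2

-- ===== PRECONDITION & SPEC =====
def Spec_solution (n : Int) (lost : List Int) (reserve : List Int) (out : Int) : Prop := out = solution_alt n lost reserve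
instance (n : Int) (lost : List Int) (reserve : List Int) (out : Int) : Decidable (Spec_solution n lost reserve out) := by unfold Spec_solution; infer_instance

-- ===== CLAIM (what is proved, stated in full; the proofs are below) =====
def Claim_equal_solution : Prop := ∀ (n : Int) (lost : List Int) (reserve : List Int), Dom_solution n lost reserve → Spec_solution n lost reserve (solution n lost reserve)

-- ===== LEMMAS AND PROOFS =====

-- In a ≤-sorted integer list, the first element within distance 1 of l is l-1 if
-- present, else l if present, else l+1 if present, else there is none.
theorem find_sorted_near (l : Int) (rs : List Int) (h : rs.Pairwise (· ≤ ·)) :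
    rs.find? (fun r => decide (|l - r| ≤ 1)) =
      (if l - 1 ∈ rs then some (l - 1)
       else if l ∈ rs then some l
       else if l + 1 ∈ rs then some (l + 1)
       else none) := by
  induction rs with
  | nil => simp
  | cons a rs ih =>
    rcases List.pairwise_cons.mp h with ⟨ha, htail⟩
    by_cases hp : |l - a| ≤ 1
    · rw [List.find?_cons_of_pos (by simpa using hp)]
      have hp' := abs_le.mp hp
      have : a = l - 1 ∨ a = l ∨ a = l + 1 := by omega
      rcases this with h1 | h1 | h1
      · rw [if_pos (by simp [h1]), h1]
      · have hnm : l - 1 ∉ a :: rs := by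
          intro hm
          rcases List.mem_cons.mp hm with hm | hm
          · omega
          · have := ha _ hm; omega
        rw [if_neg hnm, if_pos (by simp [h1]), h1]
      · have hnm1 : l - 1 ∉ a :: rs := by
          intro hm
          rcases List.mem_cons.mp hm with hm | hm
          · omega
          · have := ha _ hm; omega
        have hnm2 : l ∉ a :: rs := by
          intro hm
          rcases List.mem_cons.mp hm with hm | hm
          · omega
          · have := ha _ hm; omega
        rw [if_neg hnm1, if_neg hnm2, if_pos (by simp [h1]), h1]
    · rw [List.find?_cons_of_neg (by simpa using hp)]
      rw [not_le] at hp
      rcases lt_abs.mp hp with h2 | h2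
      · -- a < l - 1 : a is irrelevant on both sides
        have m1 : (l - 1 ∈ a :: rs) ↔ l - 1 ∈ rs := by
          constructor
          · intro hm; rcases List.mem_cons.mp hm with hm | hm
            · omega
            · exact hm
          · exact fun hm => List.mem_cons_of_mem _ hm
        have m2 : (l ∈ a :: rs) ↔ l ∈ rs := by
          constructor
          · intro hm; rcases List.mem_cons.mp hm with hm | hm
            · omega
            · exact hm
          · exact fun hm => List.mem_cons_of_mem _ hm
        have m3 : (l + 1 ∈ a :: rs) ↔ l + 1 ∈ rs := by
          constructor
          · intro hm; rcases List.mem_cons.mp hm with hm | hm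
            · omega
            · exact hm
          · exact fun hm => List.mem_cons_of_mem _ hm
        rw [ih htail]
        simp only [m1, m2, m3]
      · -- l + 1 < a : everything in a :: rs is too big
        have hbig : ∀ x ∈ a :: rs, l + 1 < x := by
          intro x hx
          rcases List.mem_cons.mp hx with hx | hx
          · omega
          · have := ha _ hx; omega
        rw [List.find?_eq_none.mpr (fun x hx => by
          have := hbig x (List.mem_cons_of_mem a hx)
          simp only [decide_eq_true_eq, not_le]
          rcases abs_cases (l - x) with ⟨e1, _⟩ | ⟨e1, _⟩ <;> omega)]
        rw [if_neg (fun hm => by have := hbig _ hm; omega),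
            if_neg (fun hm => by have := hbig _ hm; omega),
            if_neg (fun hm => by have := hbig _ hm; omega)]

-- The counting loop of B equals Counter of the filtered reserve.
theorem cnt_eq_counter (lost reserve : List Int) :
    reserve.foldl (fun (d : PySem.Dict Int Int) r =>
        if lost.contains r then d else d.insert r (d.getD r 0 + 1)) PySem.Dict.empty
      = PySem.Dict.counter (reserve.filter (fun r => !lost.contains r)) := by
  have h : ∀ (xs : List Int) (d : PySem.Dict Int Int),
      xs.foldl (fun d r => if lost.contains r then d else d.insert r (d.getD r 0 + 1)) d
      = (xs.filter (fun r => !lost.contains r)).foldl (fun d r => d.insert r (d.getD r 0 + 1)) d := by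
    intro xs
    induction xs with
    | nil => intro d; rfl
    | cons a xs ih =>
      intro d
      cases hc : lost.contains a with
      | true =>
        simpa only [List.foldl_cons, List.filter_cons, hc, Bool.not_true, if_true, if_false,
          Bool.false_eq_true, ite_true, ite_false] using ih d
      | false =>
        simpa only [List.foldl_cons, List.filter_cons, hc, Bool.not_false, if_true, if_false,
          Bool.false_eq_true, ite_true, ite_false] using ih (d.insert a (d.getD a 0 + 1))
  rw [h, PySem.Dict.foldl_insert_getD_add_one_eq_counter]

-- Main loop invariant: the dictionary holds exactly the multiplicities of the list.
theorem fold_eq (ls : List Int) (rs : List Int) (d : PySem.Dict Int Int) (ans : Int)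
    (hs : rs.Pairwise (· ≤ ·)) (hc : ∀ v, d.getD v 0 = (rs.count v : Int)) :
    (ls.foldl (fun (st : List Int × Int) l =>
      match st.1.find? (fun r => decide (|l - r| ≤ 1)) with
      | some r => ((PySem.List.remove? st.1 r).getD st.1, st.2 + 1)
      | none => st) (rs, ans)).2
    = (ls.foldl (fun (st : PySem.Dict Int Int × Int) l =>
      if st.1.getD (l - 1) 0 > 0 then (st.1.insert (l - 1) (st.1.getD (l - 1) 0 - 1), st.2 + 1)
      else if st.1.getD l 0 > 0 then (st.1.insert l (st.1.getD l 0 - 1), st.2 + 1)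
      else if st.1.getD (l + 1) 0 > 0 then (st.1.insert (l + 1) (st.1.getD (l + 1) 0 - 1), st.2 + 1)
      else st) (d, ans)).2 := by
  induction ls generalizing rs d ans with
  | nil => rfl
  | cons l ls ih =>
    simp only [List.foldl_cons]
    rw [find_sorted_near l rs hs]
    by_cases h1 : l - 1 ∈ rs
    · rw [if_pos h1]
      have hb : d.getD (l - 1) 0 > 0 := by
        rw [hc]; exact_mod_cast List.count_pos_iff.mpr h1
      rw [if_pos hb]
      simp only [PySem.List.remove?_eq_some_erase rs (l - 1) h1, Option.getD_some]
      exact ih (rs.erase (l - 1)) _ (ans + 1)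
        (List.Pairwise.sublist (List.erase_sublist) hs)
        (fun v => by
          rw [PySem.Dict.getD_insert]
          by_cases hv : v = l - 1
          · have hcp : 0 < rs.count (l - 1) := List.count_pos_iff.mpr h1
            rw [if_pos hv, hv, List.count_erase_self, hc]
            omega
          · rw [if_neg hv, hc, List.count_erase_of_ne hv])
    · rw [if_neg h1]
      have hz : ¬ d.getD (l - 1) 0 > 0 := by
        rw [hc]
        simp [List.count_eq_zero_of_not_mem h1]
      rw [if_neg hz]
      by_cases h2 : l ∈ rs
      · rw [if_pos h2]
        have hb : d.getD (l) 0 > 0 := by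
          rw [hc]; exact_mod_cast List.count_pos_iff.mpr h2
        rw [if_pos hb]
        simp only [PySem.List.remove?_eq_some_erase rs (l) h2, Option.getD_some]
        exact ih (rs.erase (l)) _ (ans + 1)
          (List.Pairwise.sublist (List.erase_sublist) hs)
          (fun v => by
            rw [PySem.Dict.getD_insert]
            by_cases hv : v = l
            · have hcp : 0 < rs.count (l) := List.count_pos_iff.mpr h2
              rw [if_pos hv, hv, List.count_erase_self, hc]
              omega
            · rw [if_neg hv, hc, List.count_erase_of_ne hv])
      · rw [if_neg h2]
        have hz : ¬ d.getD (l) 0 > 0 := by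
          rw [hc]
          simp [List.count_eq_zero_of_not_mem h2]
        rw [if_neg hz]
        by_cases h3 : l + 1 ∈ rs
        · rw [if_pos h3]
          have hb : d.getD (l + 1) 0 > 0 := by
            rw [hc]; exact_mod_cast List.count_pos_iff.mpr h3
          rw [if_pos hb]
          simp only [PySem.List.remove?_eq_some_erase rs (l + 1) h3, Option.getD_some]
          exact ih (rs.erase (l + 1)) _ (ans + 1)
            (List.Pairwise.sublist (List.erase_sublist) hs)
            (fun v => by
              rw [PySem.Dict.getD_insert]
              by_cases hv : v = l + 1
              · have hcp : 0 < rs.count (l + 1) := List.count_pos_iff.mpr h3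
                rw [if_pos hv, hv, List.count_erase_self, hc]
                omega
              · rw [if_neg hv, hc, List.count_erase_of_ne hv])
        · rw [if_neg h3]
          have hz : ¬ d.getD (l + 1) 0 > 0 := by
            rw [hc]
            simp [List.count_eq_zero_of_not_mem h3]
          rw [if_neg hz]
          exact ih rs d ans hs hc

-- ===== VERDICT (by name: the statement is the Claim_ definition above) =====
theorem solution_spec : Claim_equal_solution := by
  intro n lost reserve _
  unfold Spec_solution solution solution_alt
  have hsetl : ∀ r : Int, (PySem.Set.ofList lost).contains r = lost.contains r := by
    intro r; by_cases h : r ∈ lost <;> simp [h, PySem.Set.mem_ofList]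
  have hsetr : ∀ r : Int, (PySem.Set.ofList reserve).contains r = reserve.contains r := by
    intro r; by_cases h : r ∈ reserve <;> simp [h, PySem.Set.mem_ofList]
  simp only [hsetl, hsetr]
  rw [cnt_eq_counter]
  exact fold_eq _ _ _ _ (PySem.List.sorted_pairwise _ _)
    (fun v => by
      rw [PySem.Dict.getD_counter]
      exact congrArg _ ((PySem.List.sorted_perm _ _ _).count_eq v).symm)
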